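-- pv_equiv track=rewrite | github.com/MikiEremiki/baby_domik_bot | components/utilities/hlp_func.py | enum_current_show_by_month
-- ===== SOURCE A (Python) =====
-- def enum_current_show_by_month(dict_of_date_show: dict, num: str) -> dict:
--     filter_show_id = {}
--     i = 1
--     for key, items in dict_of_date_show.items():
--         if num is not None and key[3:5] != num:
--             continue
--         for item in items:
--             if item not in filter_show_id.keys():
--                 filter_show_id[item] = i
--                 i += 1
--
--     return filter_show_id
-- ===== SOURCE B (Python) =====
-- def enum_current_show_by_month(dict_of_date_show: dict, num: str) -> dict:
--     flat = [item
--             for key, vals in dict_of_date_show.items()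
--             if num is None or key[3:5] == num
--             for item in vals]
--     order = sorted(set(flat), key=flat.index)
--     return {item: i for i, item in enumerate(order, 1)}
-- ===== Notes on version B (the rewrite author's own statement) =====
-- stated objective: alternative
-- what changed: Instead of threading a dict and a manual counter through the nested loops with an inline membership test, B collects the month-matching items into a flat list, takes its set, SORTS the distinct items by their first-occurrence position (key=flat.index), and enumerates the sorted list; correctness rests on the fact that sorting distinct items by first index reproduces first-seen order.
import Mathlib
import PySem

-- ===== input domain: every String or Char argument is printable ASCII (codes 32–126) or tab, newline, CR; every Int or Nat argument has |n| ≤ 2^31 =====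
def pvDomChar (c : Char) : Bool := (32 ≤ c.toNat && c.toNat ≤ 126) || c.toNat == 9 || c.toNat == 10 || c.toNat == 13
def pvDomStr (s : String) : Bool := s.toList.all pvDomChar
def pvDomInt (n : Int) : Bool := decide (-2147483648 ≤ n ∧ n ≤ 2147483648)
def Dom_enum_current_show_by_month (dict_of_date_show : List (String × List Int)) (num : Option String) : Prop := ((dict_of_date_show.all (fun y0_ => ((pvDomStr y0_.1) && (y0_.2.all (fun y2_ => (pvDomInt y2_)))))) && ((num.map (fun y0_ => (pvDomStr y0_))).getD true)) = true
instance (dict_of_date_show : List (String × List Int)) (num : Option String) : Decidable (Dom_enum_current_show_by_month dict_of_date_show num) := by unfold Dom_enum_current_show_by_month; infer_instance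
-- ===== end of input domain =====

-- B replaces A's fused dedupe-while-numbering loop by: collect the month-matching items,
-- sort the distinct items by first-occurrence index, then enumerate (objective: alternative).


-- ===== PORT A =====
def enum_current_show_by_month (dict_of_date_show : List (String × List Int)) (num : Option String) : List (Int × Int) :=
  (dict_of_date_show.foldl
    (fun (st : PySem.Dict Int Int × Int) kv =>
      if (match num with
          | none => false
          | some s => PySem.Str.slice kv.1 (some 3) (some 5) != s) then st
      else kv.2.foldl
        (fun (st : PySem.Dict Int Int × Int) item =>
          if st.1.contains item = false then (st.1.insert item st.2, st.2 + 1) else st)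
        st)
    (PySem.Dict.mk [], 1)).1.items

-- ===== PORT B =====
-- key=flat.index: index? never misses here (every element of set(flat) is in flat), so .getD 0 is exact
def enum_current_show_by_month_alt (dict_of_date_show : List (String × List Int)) (num : Option String) : List (Int × Int) :=
  let flat := (dict_of_date_show.filter
      (fun kv => match num with
        | none => true
        | some s => PySem.Str.slice kv.1 (some 3) (some 5) == s)).flatMap (fun kv => kv.2)
  let order := PySem.List.sorted (PySem.Set.ofList flat) (fun x => (PySem.List.index? flat x).getD 0)
  (PySem.List.enumerate order 1).map (fun p => (p.2, p.1))

-- ===== PRECONDITION & SPEC =====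
def Spec_enum_current_show_by_month (dict_of_date_show : List (String × List Int)) (num : Option String) (out : List (Int × Int)) : Prop := out = enum_current_show_by_month_alt dict_of_date_show num
instance (dict_of_date_show : List (String × List Int)) (num : Option String) (out : List (Int × Int)) : Decidable (Spec_enum_current_show_by_month dict_of_date_show num out) := by unfold Spec_enum_current_show_by_month; infer_instance

-- ===== CLAIM (what is proved, stated in full; the proofs are below) =====
def Claim_equal_enum_current_show_by_month : Prop := ∀ (dict_of_date_show : List (String × List Int)) (num : Option String), Dom_enum_current_show_by_month dict_of_date_show num → Spec_enum_current_show_by_month dict_of_date_show num (enum_current_show_by_month dict_of_date_show num)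

-- ===== LEMMAS AND PROOFS =====

-- A's inner loop step, named for the proofs
def pvStep (st : PySem.Dict Int Int × Int) (item : Int) : PySem.Dict Int Int × Int :=
  if st.1.contains item = false then (st.1.insert item st.2, st.2 + 1) else st

lemma pv_contains (s : List Int) (x : Int) :
    (PySem.Dict.mk ((PySem.List.enumerate s 1).map (fun p => (p.2, p.1))) :
      PySem.Dict Int Int).contains x = decide (x ∈ s) := by
  show ((PySem.List.enumerate s 1).map (fun p => (p.2, p.1))).any (fun p => p.1 == x)
      = decide (x ∈ s)
  rw [List.any_map]
  have h2 : (PySem.List.enumerate s 1).any (((fun p => p.1 == x) ∘ fun p => (p.2, p.1)))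
      = ((PySem.List.enumerate s 1).map (fun p => p.2)).any (fun a => a == x) := by
    rw [List.any_map]; rfl
  rw [h2, PySem.List.map_snd_enumerate]
  simp [List.any_beq']

-- the dict state reached by A is the enumerated form of the list of items seen so far
lemma pv_loop (items : List Int) (s : List Int) :
    items.foldl pvStep
      (PySem.Dict.mk ((PySem.List.enumerate s 1).map (fun p => (p.2, p.1))), (s.length : Int) + 1)
    = (PySem.Dict.mk ((PySem.List.enumerate (items.foldl PySem.Set.add s) 1).map (fun p => (p.2, p.1))),
       ((items.foldl PySem.Set.add s).length : Int) + 1) := by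
  induction items generalizing s with
  | nil => rfl
  | cons x xs ih =>
    by_cases hx : x ∈ s
    · have hadd : PySem.Set.add s x = s := by
        simp [PySem.Set.add, PySem.Set.contains, hx]
      have hstep : pvStep
          (PySem.Dict.mk ((PySem.List.enumerate s 1).map (fun p => (p.2, p.1))), (s.length : Int) + 1) x
          = (PySem.Dict.mk ((PySem.List.enumerate s 1).map (fun p => (p.2, p.1))), (s.length : Int) + 1) := by
        simp only [pvStep, pv_contains]
        rw [if_neg (by simp [hx])]
      simp only [List.foldl_cons, hstep, hadd, ih]
    · have hadd : PySem.Set.add s x = s ++ [x] := by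
        simp [PySem.Set.add, PySem.Set.contains, hx]
      have hins : (PySem.Dict.mk ((PySem.List.enumerate s 1).map (fun p => (p.2, p.1))) :
          PySem.Dict Int Int).insert x ((s.length : Int) + 1)
          = PySem.Dict.mk ((PySem.List.enumerate (s ++ [x]) 1).map (fun p => (p.2, p.1))) := by
        unfold PySem.Dict.insert
        rw [pv_contains, if_neg (by simp [hx])]
        rw [PySem.List.enumerate_append]
        simp [PySem.List.enumerate_cons, PySem.List.enumerate_nil, add_comm]
      have hstep : pvStep
          (PySem.Dict.mk ((PySem.List.enumerate s 1).map (fun p => (p.2, p.1))), (s.length : Int) + 1) x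
          = (PySem.Dict.mk ((PySem.List.enumerate (s ++ [x]) 1).map (fun p => (p.2, p.1))),
             ((s ++ [x]).length : Int) + 1) := by
        simp only [pvStep, pv_contains]
        rw [if_pos (by simp [hx])]
        rw [hins]
        refine congrArg _ ?_
        simp only [List.length_append, List.length_cons, List.length_nil]
        push_cast
        omega
      simp only [List.foldl_cons, hstep, hadd, ih]

-- nested loops with a boolean guard fold pvStep over the flat filtered item list
lemma pv_outer_gen (g : String × List Int → Bool) (d : List (String × List Int))
    (st : PySem.Dict Int Int × Int) :
    d.foldl (fun (st : PySem.Dict Int Int × Int) kv =>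
        if g kv then kv.2.foldl pvStep st else st) st
    = ((d.filter g).flatMap (fun kv => kv.2)).foldl pvStep st := by
  induction d generalizing st with
  | nil => rfl
  | cons kv rest ih =>
    cases hg : g kv
    · simp [hg, ih]
    · simp [hg, List.foldl_append, ih]

-- set(xs) lists the distinct elements in strictly increasing order of first-occurrence index
lemma pv_pairwise (xs : List Int) :
    (PySem.Set.ofList xs).Pairwise
      (fun a b => (PySem.List.index? xs a).getD 0 < (PySem.List.index? xs b).getD 0) := by
  induction xs using List.reverseRecOn with
  | nil => simp [PySem.Set.ofList]
  | append_singleton xs x ih =>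
    rw [PySem.Set.ofList_append_singleton]
    have hold : (PySem.Set.ofList xs).Pairwise
        (fun a b => (PySem.List.index? (xs ++ [x]) a).getD 0
                  < (PySem.List.index? (xs ++ [x]) b).getD 0) := by
      refine ih.imp_of_mem ?_
      intro a b ha hb h
      have ha' : a ∈ xs := (PySem.Set.mem_ofList xs a).1 ha
      have hb' : b ∈ xs := (PySem.Set.mem_ofList xs b).1 hb
      rwa [PySem.List.index?_append_of_mem _ ha', PySem.List.index?_append_of_mem _ hb']
    by_cases hx : x ∈ xs
    · have : PySem.Set.add (PySem.Set.ofList xs) x = PySem.Set.ofList xs := by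
        simp [PySem.Set.add, PySem.Set.contains, (PySem.Set.mem_ofList xs x).2 hx]
      rw [this]; exact hold
    · have hadd : PySem.Set.add (PySem.Set.ofList xs) x = PySem.Set.ofList xs ++ [x] := by
        have : x ∉ PySem.Set.ofList xs := fun h => hx ((PySem.Set.mem_ofList xs x).1 h)
        simp [PySem.Set.add, PySem.Set.contains, this]
      rw [hadd, List.pairwise_append]
      refine ⟨hold, List.pairwise_singleton _ _, ?_⟩
      intro a ha b hb
      have ha' : a ∈ xs := (PySem.Set.mem_ofList xs a).1 ha
      have hbx : b = x := List.mem_singleton.1 hb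
      subst hbx
      have hs := (PySem.List.index?_isSome_iff xs a).2 ha'
      obtain ⟨k, hk⟩ := Option.isSome_iff_exists.1 hs
      obtain ⟨hklt, -, -⟩ := PySem.List.getElem_of_index?_eq_some hk
      rw [PySem.List.index?_append_of_mem _ ha', PySem.List.index?_append_singleton_self xs b hx, hk]
      simpa using hklt

-- ===== VERDICT (by name: the statement is the Claim_ definition above) =====
theorem enum_current_show_by_month_spec : Claim_equal_enum_current_show_by_month := by
  intro d num _
  show enum_current_show_by_month d num = enum_current_show_by_month_alt d num
  unfold enum_current_show_by_month enum_current_show_by_month_alt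
  have hfun : (fun (st : PySem.Dict Int Int × Int) (kv : String × List Int) =>
      if (match num with
          | none => false
          | some s => PySem.Str.slice kv.1 (some 3) (some 5) != s) then st
      else kv.2.foldl
        (fun (st : PySem.Dict Int Int × Int) item =>
          if st.1.contains item = false then (st.1.insert item st.2, st.2 + 1) else st)
        st)
      = (fun (st : PySem.Dict Int Int × Int) (kv : String × List Int) =>
          if (fun (kv : String × List Int) => match num with
              | none => true
              | some s => PySem.Str.slice kv.1 (some 3) (some 5) == s) kv
          then kv.2.foldl pvStep st else st) := by
    funext st kv
    cases num with
    | none =>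
      simp only [if_true]
      rfl
    | some s =>
      by_cases h : PySem.Str.slice kv.1 (some 3) (some 5) = s
      · simp only [h, bne_self_eq_false, Bool.false_eq_true, if_false, beq_self_eq_true, if_true]
        rfl
      · simp [h]
  rw [hfun, pv_outer_gen]
  set flat := ((d.filter (fun kv => match num with
      | none => true
      | some s => PySem.Str.slice kv.1 (some 3) (some 5) == s)).flatMap (fun kv => kv.2)) with hflat
  have hsorted : PySem.List.sorted (PySem.Set.ofList flat)
      (fun x => (PySem.List.index? flat x).getD 0) = PySem.Set.ofList flat :=
    PySem.List.sorted_eq_of_perm_of_pairwise_lt _ _ _ (List.Perm.refl _) (pv_pairwise flat)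
  have h0 : ((PySem.Dict.mk [] : PySem.Dict Int Int), (1 : Int))
      = (PySem.Dict.mk ((PySem.List.enumerate ([] : List Int) 1).map (fun p => (p.2, p.1))),
         (([] : List Int).length : Int) + 1) := by rfl
  rw [h0, pv_loop]
  simp only [hsorted]
  simp [PySem.Set.ofList_eq_foldl]
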